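-- pv_equiv track=rewrite | github.com/JayantiU/Tetris | tetrisReal.py | validPos
-- ===== SOURCE A (Python) =====
-- def validPos(board,shape,x,y,direction):
--     'Returns True if the shape is on board'
--     for i in range(len(shape)): #y -axis
--         for j in range(len(shape[0])): #x-axis
--             if direction=='left':
--                 if j+x+-1>0 and j+x+-1<16 and i+y<20:
--                     return True
--             elif direction=='right':
--                 if j+x+1>0 and j+x+1<16 and i+y<20:
--                     return True
--             elif direction=='down':
--                 if j+x>0 and j+x<16 and i+y+1<20:
--                     return True
--     return False
-- ===== SOURCE B (Python) =====
-- def validPos(board, shape, x, y, direction):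
--     'Returns True if the shape is on board'
--     if not shape or not shape[0]:
--         return False
--     if direction == 'left':
--         dx, dy = x - 1, y
--     elif direction == 'right':
--         dx, dy = x + 1, y
--     elif direction == 'down':
--         dx, dy = x, y + 1
--     else:
--         return False
--     w = len(shape[0])
--     return dx < 16 and w + dx >= 2 and dy < 20
-- ===== Notes on version B (the rewrite author's own statement) =====
-- stated objective: simpler
-- what changed: Replaced the nested scan over all shape cells with a closed-form test: the loop body only depends on the shape's dimensions, so existence of a valid (i,j) reduces to a non-empty integer-interval intersection per axis.
import Mathlib
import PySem

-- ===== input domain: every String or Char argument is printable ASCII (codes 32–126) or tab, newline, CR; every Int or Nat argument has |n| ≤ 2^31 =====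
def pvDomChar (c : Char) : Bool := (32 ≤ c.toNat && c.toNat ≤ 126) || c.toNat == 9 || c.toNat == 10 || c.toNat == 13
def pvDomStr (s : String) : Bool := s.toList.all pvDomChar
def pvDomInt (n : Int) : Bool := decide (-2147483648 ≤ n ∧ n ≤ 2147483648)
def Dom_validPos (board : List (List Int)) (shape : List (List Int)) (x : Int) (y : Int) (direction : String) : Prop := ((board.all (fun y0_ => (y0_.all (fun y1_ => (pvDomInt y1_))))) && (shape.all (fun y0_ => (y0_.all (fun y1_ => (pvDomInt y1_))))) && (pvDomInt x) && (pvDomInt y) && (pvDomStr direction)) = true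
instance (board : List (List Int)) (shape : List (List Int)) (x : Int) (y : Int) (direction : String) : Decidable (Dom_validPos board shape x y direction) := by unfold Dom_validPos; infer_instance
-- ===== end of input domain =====

-- B replaces A's nested scan over all shape cells with a closed-form interval-intersection
-- test (the loop body never reads cell values, only the shape's dimensions); objective: simpler.


-- ===== PORT A =====
-- Nested for-loops with early 'return True' = nested List.any over the ranges;
-- len(shape[0]) is only evaluated when the outer loop runs, so shape.headD [] is exact there.
def validPos (board : List (List Int)) (shape : List (List Int)) (x : Int) (y : Int) (direction : String) : Bool :=
  (PySem.List.pyRange 0 (shape.length : Int) 1).any (fun i =>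
    (PySem.List.pyRange 0 ((shape.headD []).length : Int) 1).any (fun j =>
      if direction = "left" then
        decide (j + x + -1 > 0) && decide (j + x + -1 < 16) && decide (i + y < 20)
      else if direction = "right" then
        decide (j + x + 1 > 0) && decide (j + x + 1 < 16) && decide (i + y < 20)
      else if direction = "down" then
        decide (j + x > 0) && decide (j + x < 16) && decide (i + y + 1 < 20)
      else false))

-- ===== PORT B =====
def vpCheck (dx dy w : Int) : Bool :=
  decide (dx < 16) && decide (w + dx ≥ 2) && decide (dy < 20)

def validPos_alt (board : List (List Int)) (shape : List (List Int)) (x : Int) (y : Int) (direction : String) : Bool :=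
  match shape with
  | [] => false
  | r0 :: _ =>
    if r0.length = 0 then false
    else if direction = "left" then vpCheck (x - 1) y (r0.length : Int)
    else if direction = "right" then vpCheck (x + 1) y (r0.length : Int)
    else if direction = "down" then vpCheck x (y + 1) (r0.length : Int)
    else false

-- ===== PRECONDITION & SPEC =====
def Spec_validPos (board : List (List Int)) (shape : List (List Int)) (x : Int) (y : Int) (direction : String) (out : Bool) : Prop := out = validPos_alt board shape x y direction
instance (board : List (List Int)) (shape : List (List Int)) (x : Int) (y : Int) (direction : String) (out : Bool) : Decidable (Spec_validPos board shape x y direction out) := by unfold Spec_validPos; infer_instance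

-- ===== CLAIM (what is proved, stated in full; the proofs are below) =====
def Claim_equal_validPos : Prop := ∀ (board : List (List Int)) (shape : List (List Int)) (x : Int) (y : Int) (direction : String), Dom_validPos board shape x y direction → Spec_validPos board shape x y direction (validPos board shape x y direction)

-- ===== LEMMAS AND PROOFS =====
-- The nested ∃ over rectangular ranges splits: the j-conditions and the i-condition are
-- independent, and each non-empty integer-interval intersection is a pair of inequalities.
lemma any_any_eq (h w dx dy : Int) (hh : 0 < h) (hw : 0 < w) :
    ((PySem.List.pyRange 0 h 1).any (fun i =>
      (PySem.List.pyRange 0 w 1).any (fun j =>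
        decide (j + dx > 0) && decide (j + dx < 16) && decide (i + dy < 20))))
    = vpCheck dx dy w := by
  rw [Bool.eq_iff_iff]
  simp only [List.any_eq_true, PySem.List.mem_pyRange_one, Bool.and_eq_true, decide_eq_true_eq,
    vpCheck]
  constructor
  · rintro ⟨i, ⟨hi0, hih⟩, j, ⟨hj0, hjw⟩, ⟨h1, h2⟩, h3⟩
    refine ⟨⟨by omega, by omega⟩, by omega⟩
  · rintro ⟨⟨h1, h2⟩, h3⟩
    exact ⟨0, ⟨le_refl 0, hh⟩, max 0 (1 - dx), ⟨by omega, by omega⟩, ⟨⟨by omega, by omega⟩, by omega⟩⟩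

-- ===== VERDICT (by name: the statement is the Claim_ definition above) =====
theorem validPos_spec : Claim_equal_validPos := by
  intro board shape x y direction _
  unfold Spec_validPos validPos validPos_alt
  cases shape with
  | nil => simp [PySem.List.pyRange_one_eq_nil]
  | cons r0 rest =>
    by_cases hr : r0.length = 0
    · simp [hr, PySem.List.pyRange_one_eq_nil]
    · have hw : (0 : Int) < (r0.length : Int) := by omega
      have hh : (0 : Int) < ((r0 :: rest).length : Int) := by simp
      simp only [List.headD_cons, hr, if_false]
      by_cases hl : direction = "left"
      · subst hl
        simp only [reduceIte]
        rw [show (x : Int) - 1 = x + -1 from by ring]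
        simp only [Int.add_assoc]
        exact any_any_eq _ _ (x + -1) y hh hw
      · by_cases hrt : direction = "right"
        · subst hrt
          simp only [reduceIte]
          simp only [Int.add_assoc]
          exact any_any_eq _ _ (x + 1) y hh hw
        · by_cases hd : direction = "down"
          · subst hd
            simp only [reduceIte]
            simp only [Int.add_assoc]
            exact any_any_eq _ _ x (y + 1) hh hw
          · simp [hl, hrt, hd]
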